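-- pv_equiv track=rewrite | github.com/Qy248/SecureWatch-LostFound-Backend | lostandfound.py | _class_to_code
-- ===== SOURCE A (Python) =====
-- def _class_to_code(class_name: str) -> str:
--     n = (class_name or "UNK").lower().strip()
--
--     if "cell" in n or "phone" in n:
--         return "CELLPH"
--     if "bottle" in n:
--         return "BOTTLE"
--     if "laptop" in n:
--         return "LAPTOP"
--     if "tablet" in n:
--         return "TABLET"
--     if "backpack" in n or "bag" in n:
--         return "BAG"
--     if "handbag" in n:
--         return "HANDBG"
--     if "wallet" in n:
--         return "WALLET"
--     if "key" in n:
--         return "KEY"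
--     if "earphone" in n or "headphone" in n:
--         return "EARPHN"
--     if "usb" in n:
--         return "USB"
--     if "umbrella" in n:
--         return "UMBREL"
--     if "book" in n:
--         return "BOOK"
--
--     # fallback
--     return "".join(ch for ch in n.upper() if ch.isalnum())[:6] or "UNK"
-- ===== SOURCE B (Python) =====
-- _KW = {"cell": 0, "phone": 0, "bottle": 1, "laptop": 2, "tablet": 3,
--        "backpack": 4, "bag": 4, "handbag": 5, "wallet": 6, "key": 7,
--        "earphone": 8, "headphone": 8, "usb": 9, "umbrella": 10, "book": 11}
-- _CODES = ["CELLPH", "BOTTLE", "LAPTOP", "TABLET", "BAG", "HANDBG",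
--           "WALLET", "KEY", "EARPHN", "USB", "UMBREL", "BOOK"]
--
-- def _class_to_code(class_name: str) -> str:
--     n = (class_name or "UNK").lower().strip()
--     best = None
--     # hash-lookup every substring of keyword length (3..9) rather than
--     # searching for each keyword; keep the lowest-priority rule hit
--     for i in range(len(n)):
--         for L in range(3, 10):
--             r = _KW.get(n[i:i + L])
--             if r is not None and (best is None or r < best):
--                 best = r
--     if best is not None:
--         return _CODES[best]
--     return "".join(ch for ch in n.upper() if ch.isalnum())[:6] or "UNK"
-- ===== Notes on version B (the rewrite author's own statement) =====
-- stated objective: alternative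
-- what changed: Instead of testing each of the 15 keywords for substring containment in branch order, B hash-looks-up every substring of keyword length (3..9) of the normalized name in a keyword-to-rule-index dict and keeps the lowest rule index hit, returning that rule's code (same normalization and fallback).
import Mathlib
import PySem

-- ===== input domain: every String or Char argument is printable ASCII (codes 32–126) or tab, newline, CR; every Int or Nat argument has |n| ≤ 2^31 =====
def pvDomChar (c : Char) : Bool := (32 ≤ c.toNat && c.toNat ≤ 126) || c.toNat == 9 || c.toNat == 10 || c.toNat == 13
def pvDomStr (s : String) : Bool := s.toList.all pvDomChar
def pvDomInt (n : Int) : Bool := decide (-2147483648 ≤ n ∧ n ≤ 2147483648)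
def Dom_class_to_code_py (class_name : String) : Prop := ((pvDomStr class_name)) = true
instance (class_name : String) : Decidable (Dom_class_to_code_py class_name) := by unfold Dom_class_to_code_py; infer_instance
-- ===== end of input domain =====

-- B replaces A's per-keyword substring searches by a hash lookup of every substring of
-- keyword length (3..9) in a keyword->rule-index dict, keeping the lowest rule index hit
-- (same normalization and fallback); objective: alternative (a different algorithm, not faster).


-- ===== PORT A =====
-- fallback: "".join(ch for ch in n.upper() if ch.isalnum())[:6] or "UNK"  (identical line in both Pythons)
def pvFallback (n : String) : String :=
  let r := String.ofList (PySem.List.slice ((PySem.Str.upper n).toList.filter PySem.Chars.isalnum) none (some 6))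
  if r = "" then "UNK" else r

def class_to_code_py (class_name : String) : String :=
  let n := PySem.Str.strip (PySem.Str.lower (if class_name = "" then "UNK" else class_name))
  if PySem.Str.isIn "cell" n || PySem.Str.isIn "phone" n then "CELLPH"
  else if PySem.Str.isIn "bottle" n then "BOTTLE"
  else if PySem.Str.isIn "laptop" n then "LAPTOP"
  else if PySem.Str.isIn "tablet" n then "TABLET"
  else if PySem.Str.isIn "backpack" n || PySem.Str.isIn "bag" n then "BAG"
  else if PySem.Str.isIn "handbag" n then "HANDBG"
  else if PySem.Str.isIn "wallet" n then "WALLET"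
  else if PySem.Str.isIn "key" n then "KEY"
  else if PySem.Str.isIn "earphone" n || PySem.Str.isIn "headphone" n then "EARPHN"
  else if PySem.Str.isIn "usb" n then "USB"
  else if PySem.Str.isIn "umbrella" n then "UMBREL"
  else if PySem.Str.isIn "book" n then "BOOK"
  else pvFallback n

-- ===== PORT B =====
-- _KW : keyword -> rule index
def pvKW : PySem.Dict String Int := PySem.Dict.ofList
  [("cell", 0), ("phone", 0), ("bottle", 1), ("laptop", 2), ("tablet", 3),
   ("backpack", 4), ("bag", 4), ("handbag", 5), ("wallet", 6), ("key", 7),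
   ("earphone", 8), ("headphone", 8), ("usb", 9), ("umbrella", 10), ("book", 11)]

-- _CODES
def pvCodes : List String :=
  ["CELLPH", "BOTTLE", "LAPTOP", "TABLET", "BAG", "HANDBG",
   "WALLET", "KEY", "EARPHN", "USB", "UMBREL", "BOOK"]

-- 'best is None or r < best' update
def pvUpd (best : Option Int) (r : Int) : Option Int :=
  match best with
  | none => some r
  | some b => if r < b then some r else some b

-- inner loop body: for L in range(3, 10): r = _KW.get(n[i:i+L]); if r is not None and …
def pvStep (n : String) (best : Option Int) (i : Int) : Option Int :=
  (PySem.List.pyRange 3 10 1).foldl (fun best L =>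
    match PySem.Dict.get? pvKW (PySem.Str.slice n (some i) (some (i + L))) with
    | none => best
    | some r => pvUpd best r) best

def class_to_code_py_alt (class_name : String) : String :=
  let n := PySem.Str.strip (PySem.Str.lower (if class_name = "" then "UNK" else class_name))
  let best := (PySem.List.pyRange 0 (PySem.Str.len n) 1).foldl (pvStep n) none
  match best with
  | some b => (PySem.List.pyGet? pvCodes b).getD ""  -- _CODES[best]; IndexError unreachable: pvKW's values lie in [0, 12)
  | none => pvFallback n

-- ===== PRECONDITION & SPEC =====
def Spec_class_to_code_py (class_name : String) (out : String) : Prop := out = class_to_code_py_alt class_name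
instance (class_name : String) (out : String) : Decidable (Spec_class_to_code_py class_name out) := by unfold Spec_class_to_code_py; infer_instance

-- ===== CLAIM =====
def Claim_equal_class_to_code_py : Prop := ∀ (class_name : String), Dom_class_to_code_py class_name → Spec_class_to_code_py class_name (class_to_code_py class_name)

-- ===== LEMMAS AND PROOFS =====

-- the multiset of rule indices hit by B's substring scan over n
def pvHits (n : String) : List Int :=
  (PySem.List.pyRange 0 (PySem.Str.len n) 1).flatMap (fun i =>
    (PySem.List.pyRange 3 10 1).filterMap (fun L =>
      PySem.Dict.get? pvKW (PySem.Str.slice n (some i) (some (i + L)))))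

theorem pv_foldl_opt (f : Int → Option Int) (xs : List Int) (b : Option Int) :
    xs.foldl (fun b L => match f L with | none => b | some r => pvUpd b r) b
      = (xs.filterMap f).foldl pvUpd b := by
  induction xs generalizing b with
  | nil => rfl
  | cons x xs ih =>
      simp only [List.foldl_cons, List.filterMap_cons]
      cases f x <;> simp [ih]

theorem pv_best_eq_hits (n : String) :
    (PySem.List.pyRange 0 (PySem.Str.len n) 1).foldl (pvStep n) none
      = (pvHits n).foldl pvUpd none := by
  unfold pvHits
  have hf : pvStep n = fun (b : Option Int) (i : Int) =>
      ((PySem.List.pyRange 3 10 1).filterMap (fun L =>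
        PySem.Dict.get? pvKW (PySem.Str.slice n (some i) (some (i + L))))).foldl pvUpd b :=
    funext fun b => funext fun i => pv_foldl_opt _ _ b
  rw [hf, List.foldl_flatMap]

theorem pv_foldl_upd_some (xs : List Int) (b : Int) :
    xs.foldl pvUpd (some b) = some (xs.foldl min b) := by
  induction xs generalizing b with
  | nil => rfl
  | cons x xs ih =>
      simp only [List.foldl_cons]
      rcases lt_or_ge x b with h | h
      · rw [show pvUpd (some b) x = some x by simp [pvUpd, h], ih,
            show min b x = x from min_eq_right h.le]
      · rw [show pvUpd (some b) x = some b by simp [pvUpd, not_lt.mpr h], ih,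
            show min b x = b from min_eq_left h]

theorem pv_foldl_upd_min? (xs : List Int) : xs.foldl pvUpd none = xs.min? := by
  cases xs with
  | nil => rfl
  | cons x xs =>
      show List.foldl pvUpd (pvUpd none x) xs = _
      rw [show pvUpd none x = some x from rfl, pv_foldl_upd_some]
      rfl

-- membership in B's hit list ↔ some keyword of that rule index is a substring of n
theorem pv_items_kw : pvKW.items =
    [("cell", (0:Int)), ("phone", 0), ("bottle", 1), ("laptop", 2), ("tablet", 3),
     ("backpack", 4), ("bag", 4), ("handbag", 5), ("wallet", 6), ("key", 7),
     ("earphone", 8), ("headphone", 8), ("usb", 9), ("umbrella", 10), ("book", 11)] := by rfl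

-- a slice n[i:i+L] with 0 ≤ i, 0 ≤ L is a substring of n
theorem pv_isIn_slice (n : String) (i L : Int) (hi : 0 ≤ i) (hL : 0 ≤ L) (k : String)
    (hs : PySem.Str.slice n (some i) (some (i + L)) = k) : PySem.Str.isIn k n = true := by
  rw [PySem.Str.isIn_iff_infix, ← hs]
  have ht : (PySem.Str.slice n (some i) (some (i + L))).toList
      = (n.toList.drop i.toNat).take ((i + L).toNat - i.toNat) := by
    simp only [pysem]
    exact PySem.List.slice_toNat _ hi (by omega)
  rw [ht]
  exact (List.take_prefix _ _).isInfix.trans (n.toList.drop_suffix _).isInfix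

theorem pv_mem_hits_of (n k : String) (r : Int)
    (hk : PySem.Dict.get? pvKW k = some r)
    (hlen : 3 ≤ k.toList.length ∧ k.toList.length ≤ 9)
    (hin : PySem.Str.isIn k n = true) : r ∈ pvHits n := by
  have hinf : ∃ j, k.toList <+: n.toList.drop j := by
    rw [PySem.Chars.exists_prefix_drop_iff_isIn]
    simpa [pysem] using hin
  obtain ⟨j, hpre⟩ := hinf
  have hjlen : k.toList.length ≤ n.toList.length - j := by
    simpa using hpre.length_le
  have hj : j < n.toList.length := by omega
  unfold pvHits
  refine List.mem_flatMap.mpr ⟨(j : Int), ?_, ?_⟩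
  · refine (PySem.List.mem_pyRange_one).mpr ⟨by positivity, ?_⟩
    have hlen2 : PySem.Str.len n = (n.toList.length : Int) := by simp [pysem]
    rw [hlen2]
    exact_mod_cast hj
  · refine List.mem_filterMap.mpr ⟨(k.toList.length : Int), ?_, ?_⟩
    · exact (PySem.List.mem_pyRange_one).mpr ⟨by exact_mod_cast hlen.1, by exact_mod_cast Nat.lt_succ_of_le hlen.2⟩
    · have hs : PySem.Str.slice n (some (j : Int)) (some ((j : Int) + (k.toList.length : Int))) = k := by
        apply String.toList_inj.mp
        have hsl : (PySem.Str.slice n (some (j : Int)) (some ((j : Int) + (k.toList.length : Int)))).toList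
            = (n.toList.drop j).take k.toList.length := by
          simp [pysem, PySem.List.slice_natCast_add]
        rw [hsl]
        exact (List.prefix_iff_eq_take.mp hpre).symm
      rw [hs, hk]

theorem pv_mem_hits (n : String) (r : Int) : r ∈ pvHits n ↔
    ((PySem.Str.isIn "cell" n = true ∨ PySem.Str.isIn "phone" n = true) ∧ r = 0) ∨
    (PySem.Str.isIn "bottle" n = true ∧ r = 1) ∨
    (PySem.Str.isIn "laptop" n = true ∧ r = 2) ∨
    (PySem.Str.isIn "tablet" n = true ∧ r = 3) ∨
    ((PySem.Str.isIn "backpack" n = true ∨ PySem.Str.isIn "bag" n = true) ∧ r = 4) ∨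
    (PySem.Str.isIn "handbag" n = true ∧ r = 5) ∨
    (PySem.Str.isIn "wallet" n = true ∧ r = 6) ∨
    (PySem.Str.isIn "key" n = true ∧ r = 7) ∨
    ((PySem.Str.isIn "earphone" n = true ∨ PySem.Str.isIn "headphone" n = true) ∧ r = 8) ∨
    (PySem.Str.isIn "usb" n = true ∧ r = 9) ∨
    (PySem.Str.isIn "umbrella" n = true ∧ r = 10) ∨
    (PySem.Str.isIn "book" n = true ∧ r = 11) := by
  constructor
  · intro hmem
    unfold pvHits at hmem
    obtain ⟨i, hi, hmem⟩ := List.mem_flatMap.mp hmem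
    obtain ⟨L, hL, hget⟩ := List.mem_filterMap.mp hmem
    have hi0 : 0 ≤ i := ((PySem.List.mem_pyRange_one).mp hi).1
    have hL0 : 0 ≤ L := le_trans (by norm_num) ((PySem.List.mem_pyRange_one).mp hL).1
    have hin := pv_isIn_slice n i L hi0 hL0 _ rfl
    have hmem' := PySem.Dict.mem_items_of_get?_eq_some _ hget
    rw [pv_items_kw] at hmem'
    simp only [List.mem_cons, List.not_mem_nil, or_false, Prod.mk.injEq] at hmem'
    rcases hmem' with ⟨hs, hr⟩|⟨hs, hr⟩|⟨hs, hr⟩|⟨hs, hr⟩|⟨hs, hr⟩|⟨hs, hr⟩|⟨hs, hr⟩|⟨hs, hr⟩|⟨hs, hr⟩|⟨hs, hr⟩|⟨hs, hr⟩|⟨hs, hr⟩|⟨hs, hr⟩|⟨hs, hr⟩|⟨hs, hr⟩ <;> subst hr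
    · exact Or.inl (⟨Or.inl (hs ▸ hin), rfl⟩)
    · exact Or.inl (⟨Or.inr (hs ▸ hin), rfl⟩)
    · exact Or.inr (Or.inl (⟨hs ▸ hin, rfl⟩))
    · exact Or.inr (Or.inr (Or.inl (⟨hs ▸ hin, rfl⟩)))
    · exact Or.inr (Or.inr (Or.inr (Or.inl (⟨hs ▸ hin, rfl⟩))))
    · exact Or.inr (Or.inr (Or.inr (Or.inr (Or.inl (⟨Or.inl (hs ▸ hin), rfl⟩)))))
    · exact Or.inr (Or.inr (Or.inr (Or.inr (Or.inl (⟨Or.inr (hs ▸ hin), rfl⟩)))))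
    · exact Or.inr (Or.inr (Or.inr (Or.inr (Or.inr (Or.inl (⟨hs ▸ hin, rfl⟩))))))
    · exact Or.inr (Or.inr (Or.inr (Or.inr (Or.inr (Or.inr (Or.inl (⟨hs ▸ hin, rfl⟩)))))))
    · exact Or.inr (Or.inr (Or.inr (Or.inr (Or.inr (Or.inr (Or.inr (Or.inl (⟨hs ▸ hin, rfl⟩))))))))
    · exact Or.inr (Or.inr (Or.inr (Or.inr (Or.inr (Or.inr (Or.inr (Or.inr (Or.inl (⟨Or.inl (hs ▸ hin), rfl⟩)))))))))
    · exact Or.inr (Or.inr (Or.inr (Or.inr (Or.inr (Or.inr (Or.inr (Or.inr (Or.inl (⟨Or.inr (hs ▸ hin), rfl⟩)))))))))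
    · exact Or.inr (Or.inr (Or.inr (Or.inr (Or.inr (Or.inr (Or.inr (Or.inr (Or.inr (Or.inl (⟨hs ▸ hin, rfl⟩))))))))))
    · exact Or.inr (Or.inr (Or.inr (Or.inr (Or.inr (Or.inr (Or.inr (Or.inr (Or.inr (Or.inr (Or.inl (⟨hs ▸ hin, rfl⟩)))))))))))
    · exact Or.inr (Or.inr (Or.inr (Or.inr (Or.inr (Or.inr (Or.inr (Or.inr (Or.inr (Or.inr (Or.inr (⟨hs ▸ hin, rfl⟩)))))))))))
  · intro hdis
    rcases hdis with ⟨hc | hc, hr⟩|⟨hc, hr⟩|⟨hc, hr⟩|⟨hc, hr⟩|⟨hc | hc, hr⟩|⟨hc, hr⟩|⟨hc, hr⟩|⟨hc, hr⟩|⟨hc | hc, hr⟩|⟨hc, hr⟩|⟨hc, hr⟩|⟨hc, hr⟩ <;> subst hr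
    · exact pv_mem_hits_of n "cell" 0 (by rfl) (by decide) hc
    · exact pv_mem_hits_of n "phone" 0 (by rfl) (by decide) hc
    · exact pv_mem_hits_of n "bottle" 1 (by rfl) (by decide) hc
    · exact pv_mem_hits_of n "laptop" 2 (by rfl) (by decide) hc
    · exact pv_mem_hits_of n "tablet" 3 (by rfl) (by decide) hc
    · exact pv_mem_hits_of n "backpack" 4 (by rfl) (by decide) hc
    · exact pv_mem_hits_of n "bag" 4 (by rfl) (by decide) hc
    · exact pv_mem_hits_of n "handbag" 5 (by rfl) (by decide) hc
    · exact pv_mem_hits_of n "wallet" 6 (by rfl) (by decide) hc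
    · exact pv_mem_hits_of n "key" 7 (by rfl) (by decide) hc
    · exact pv_mem_hits_of n "earphone" 8 (by rfl) (by decide) hc
    · exact pv_mem_hits_of n "headphone" 8 (by rfl) (by decide) hc
    · exact pv_mem_hits_of n "usb" 9 (by rfl) (by decide) hc
    · exact pv_mem_hits_of n "umbrella" 10 (by rfl) (by decide) hc
    · exact pv_mem_hits_of n "book" 11 (by rfl) (by decide) hc

-- the if-chain of A on a normalized string equals B's min-rule-index scan
theorem pv_main (n : String) :
    (if PySem.Str.isIn "cell" n || PySem.Str.isIn "phone" n then "CELLPH"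
     else if PySem.Str.isIn "bottle" n then "BOTTLE"
     else if PySem.Str.isIn "laptop" n then "LAPTOP"
     else if PySem.Str.isIn "tablet" n then "TABLET"
     else if PySem.Str.isIn "backpack" n || PySem.Str.isIn "bag" n then "BAG"
     else if PySem.Str.isIn "handbag" n then "HANDBG"
     else if PySem.Str.isIn "wallet" n then "WALLET"
     else if PySem.Str.isIn "key" n then "KEY"
     else if PySem.Str.isIn "earphone" n || PySem.Str.isIn "headphone" n then "EARPHN"
     else if PySem.Str.isIn "usb" n then "USB"
     else if PySem.Str.isIn "umbrella" n then "UMBREL"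
     else if PySem.Str.isIn "book" n then "BOOK"
     else pvFallback n)
    = (match (PySem.List.pyRange 0 (PySem.Str.len n) 1).foldl (pvStep n) none with
       | some b => (PySem.List.pyGet? pvCodes b).getD ""
       | none => pvFallback n) := by
  rw [pv_best_eq_hits, pv_foldl_upd_min?]
  by_cases h0 : (PySem.Str.isIn "cell" n || PySem.Str.isIn "phone" n) = true
  · rw [if_pos h0]
    rw [List.min?_eq_some_iff.mpr ⟨(pv_mem_hits n 0).mpr (Or.inl (⟨(Bool.or_eq_true _ _).mp h0, rfl⟩)),
      fun x hx => by
        have hd := (pv_mem_hits n x).mp hx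
        clear hx
        rcases hd with ⟨h,hx⟩|⟨h,hx⟩|⟨h,hx⟩|⟨h,hx⟩|⟨h,hx⟩|⟨h,hx⟩|⟨h,hx⟩|⟨h,hx⟩|⟨h,hx⟩|⟨h,hx⟩|⟨h,hx⟩|⟨h,hx⟩ <;> omega⟩]
    rfl
  rw [if_neg h0]
  by_cases h1 : (PySem.Str.isIn "bottle" n) = true
  · rw [if_pos h1]
    rw [List.min?_eq_some_iff.mpr ⟨(pv_mem_hits n 1).mpr (Or.inr (Or.inl (⟨h1, rfl⟩))),
      fun x hx => by
        have hd := (pv_mem_hits n x).mp hx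
        clear hx
        rcases hd with ⟨h,hx⟩|⟨h,hx⟩|⟨h,hx⟩|⟨h,hx⟩|⟨h,hx⟩|⟨h,hx⟩|⟨h,hx⟩|⟨h,hx⟩|⟨h,hx⟩|⟨h,hx⟩|⟨h,hx⟩|⟨h,hx⟩ <;>
          first | omega | (exfalso; subst hx; revert h; simp_all)⟩]
    rfl
  rw [if_neg h1]
  by_cases h2 : (PySem.Str.isIn "laptop" n) = true
  · rw [if_pos h2]
    rw [List.min?_eq_some_iff.mpr ⟨(pv_mem_hits n 2).mpr (Or.inr (Or.inr (Or.inl (⟨h2, rfl⟩)))),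
      fun x hx => by
        have hd := (pv_mem_hits n x).mp hx
        clear hx
        rcases hd with ⟨h,hx⟩|⟨h,hx⟩|⟨h,hx⟩|⟨h,hx⟩|⟨h,hx⟩|⟨h,hx⟩|⟨h,hx⟩|⟨h,hx⟩|⟨h,hx⟩|⟨h,hx⟩|⟨h,hx⟩|⟨h,hx⟩ <;>
          first | omega | (exfalso; subst hx; revert h; simp_all)⟩]
    rfl
  rw [if_neg h2]
  by_cases h3 : (PySem.Str.isIn "tablet" n) = true
  · rw [if_pos h3]
    rw [List.min?_eq_some_iff.mpr ⟨(pv_mem_hits n 3).mpr (Or.inr (Or.inr (Or.inr (Or.inl (⟨h3, rfl⟩))))),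
      fun x hx => by
        have hd := (pv_mem_hits n x).mp hx
        clear hx
        rcases hd with ⟨h,hx⟩|⟨h,hx⟩|⟨h,hx⟩|⟨h,hx⟩|⟨h,hx⟩|⟨h,hx⟩|⟨h,hx⟩|⟨h,hx⟩|⟨h,hx⟩|⟨h,hx⟩|⟨h,hx⟩|⟨h,hx⟩ <;>
          first | omega | (exfalso; subst hx; revert h; simp_all)⟩]
    rfl
  rw [if_neg h3]
  by_cases h4 : (PySem.Str.isIn "backpack" n || PySem.Str.isIn "bag" n) = true
  · rw [if_pos h4]
    rw [List.min?_eq_some_iff.mpr ⟨(pv_mem_hits n 4).mpr (Or.inr (Or.inr (Or.inr (Or.inr (Or.inl (⟨(Bool.or_eq_true _ _).mp h4, rfl⟩)))))),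
      fun x hx => by
        have hd := (pv_mem_hits n x).mp hx
        clear hx
        rcases hd with ⟨h,hx⟩|⟨h,hx⟩|⟨h,hx⟩|⟨h,hx⟩|⟨h,hx⟩|⟨h,hx⟩|⟨h,hx⟩|⟨h,hx⟩|⟨h,hx⟩|⟨h,hx⟩|⟨h,hx⟩|⟨h,hx⟩ <;>
          first | omega | (exfalso; subst hx; revert h; simp_all)⟩]
    rfl
  rw [if_neg h4]
  by_cases h5 : (PySem.Str.isIn "handbag" n) = true
  · rw [if_pos h5]
    rw [List.min?_eq_some_iff.mpr ⟨(pv_mem_hits n 5).mpr (Or.inr (Or.inr (Or.inr (Or.inr (Or.inr (Or.inl (⟨h5, rfl⟩))))))),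
      fun x hx => by
        have hd := (pv_mem_hits n x).mp hx
        clear hx
        rcases hd with ⟨h,hx⟩|⟨h,hx⟩|⟨h,hx⟩|⟨h,hx⟩|⟨h,hx⟩|⟨h,hx⟩|⟨h,hx⟩|⟨h,hx⟩|⟨h,hx⟩|⟨h,hx⟩|⟨h,hx⟩|⟨h,hx⟩ <;>
          first | omega | (exfalso; subst hx; revert h; simp_all)⟩]
    rfl
  rw [if_neg h5]
  by_cases h6 : (PySem.Str.isIn "wallet" n) = true
  · rw [if_pos h6]
    rw [List.min?_eq_some_iff.mpr ⟨(pv_mem_hits n 6).mpr (Or.inr (Or.inr (Or.inr (Or.inr (Or.inr (Or.inr (Or.inl (⟨h6, rfl⟩)))))))),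
      fun x hx => by
        have hd := (pv_mem_hits n x).mp hx
        clear hx
        rcases hd with ⟨h,hx⟩|⟨h,hx⟩|⟨h,hx⟩|⟨h,hx⟩|⟨h,hx⟩|⟨h,hx⟩|⟨h,hx⟩|⟨h,hx⟩|⟨h,hx⟩|⟨h,hx⟩|⟨h,hx⟩|⟨h,hx⟩ <;>
          first | omega | (exfalso; subst hx; revert h; simp_all)⟩]
    rfl
  rw [if_neg h6]
  by_cases h7 : (PySem.Str.isIn "key" n) = true
  · rw [if_pos h7]
    rw [List.min?_eq_some_iff.mpr ⟨(pv_mem_hits n 7).mpr (Or.inr (Or.inr (Or.inr (Or.inr (Or.inr (Or.inr (Or.inr (Or.inl (⟨h7, rfl⟩))))))))),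
      fun x hx => by
        have hd := (pv_mem_hits n x).mp hx
        clear hx
        rcases hd with ⟨h,hx⟩|⟨h,hx⟩|⟨h,hx⟩|⟨h,hx⟩|⟨h,hx⟩|⟨h,hx⟩|⟨h,hx⟩|⟨h,hx⟩|⟨h,hx⟩|⟨h,hx⟩|⟨h,hx⟩|⟨h,hx⟩ <;>
          first | omega | (exfalso; subst hx; revert h; simp_all)⟩]
    rfl
  rw [if_neg h7]
  by_cases h8 : (PySem.Str.isIn "earphone" n || PySem.Str.isIn "headphone" n) = true
  · rw [if_pos h8]
    rw [List.min?_eq_some_iff.mpr ⟨(pv_mem_hits n 8).mpr (Or.inr (Or.inr (Or.inr (Or.inr (Or.inr (Or.inr (Or.inr (Or.inr (Or.inl (⟨(Bool.or_eq_true _ _).mp h8, rfl⟩)))))))))),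
      fun x hx => by
        have hd := (pv_mem_hits n x).mp hx
        clear hx
        rcases hd with ⟨h,hx⟩|⟨h,hx⟩|⟨h,hx⟩|⟨h,hx⟩|⟨h,hx⟩|⟨h,hx⟩|⟨h,hx⟩|⟨h,hx⟩|⟨h,hx⟩|⟨h,hx⟩|⟨h,hx⟩|⟨h,hx⟩ <;>
          first | omega | (exfalso; subst hx; revert h; simp_all)⟩]
    rfl
  rw [if_neg h8]
  by_cases h9 : (PySem.Str.isIn "usb" n) = true
  · rw [if_pos h9]
    rw [List.min?_eq_some_iff.mpr ⟨(pv_mem_hits n 9).mpr (Or.inr (Or.inr (Or.inr (Or.inr (Or.inr (Or.inr (Or.inr (Or.inr (Or.inr (Or.inl (⟨h9, rfl⟩))))))))))),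
      fun x hx => by
        have hd := (pv_mem_hits n x).mp hx
        clear hx
        rcases hd with ⟨h,hx⟩|⟨h,hx⟩|⟨h,hx⟩|⟨h,hx⟩|⟨h,hx⟩|⟨h,hx⟩|⟨h,hx⟩|⟨h,hx⟩|⟨h,hx⟩|⟨h,hx⟩|⟨h,hx⟩|⟨h,hx⟩ <;>
          first | omega | (exfalso; subst hx; revert h; simp_all)⟩]
    rfl
  rw [if_neg h9]
  by_cases h10 : (PySem.Str.isIn "umbrella" n) = true
  · rw [if_pos h10]
    rw [List.min?_eq_some_iff.mpr ⟨(pv_mem_hits n 10).mpr (Or.inr (Or.inr (Or.inr (Or.inr (Or.inr (Or.inr (Or.inr (Or.inr (Or.inr (Or.inr (Or.inl (⟨h10, rfl⟩)))))))))))),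
      fun x hx => by
        have hd := (pv_mem_hits n x).mp hx
        clear hx
        rcases hd with ⟨h,hx⟩|⟨h,hx⟩|⟨h,hx⟩|⟨h,hx⟩|⟨h,hx⟩|⟨h,hx⟩|⟨h,hx⟩|⟨h,hx⟩|⟨h,hx⟩|⟨h,hx⟩|⟨h,hx⟩|⟨h,hx⟩ <;>
          first | omega | (exfalso; subst hx; revert h; simp_all)⟩]
    rfl
  rw [if_neg h10]
  by_cases h11 : (PySem.Str.isIn "book" n) = true
  · rw [if_pos h11]
    rw [List.min?_eq_some_iff.mpr ⟨(pv_mem_hits n 11).mpr (Or.inr (Or.inr (Or.inr (Or.inr (Or.inr (Or.inr (Or.inr (Or.inr (Or.inr (Or.inr (Or.inr (⟨h11, rfl⟩)))))))))))),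
      fun x hx => by
        have hd := (pv_mem_hits n x).mp hx
        clear hx
        rcases hd with ⟨h,hx⟩|⟨h,hx⟩|⟨h,hx⟩|⟨h,hx⟩|⟨h,hx⟩|⟨h,hx⟩|⟨h,hx⟩|⟨h,hx⟩|⟨h,hx⟩|⟨h,hx⟩|⟨h,hx⟩|⟨h,hx⟩ <;>
          first | omega | (exfalso; subst hx; revert h; simp_all)⟩]
    rfl
  rw [if_neg h11]
  have hnil : pvHits n = [] := by
    rw [List.eq_nil_iff_forall_not_mem]
    intro x hx
    have hd := (pv_mem_hits n x).mp hx
    clear hx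
    rcases hd with ⟨h,hx⟩|⟨h,hx⟩|⟨h,hx⟩|⟨h,hx⟩|⟨h,hx⟩|⟨h,hx⟩|⟨h,hx⟩|⟨h,hx⟩|⟨h,hx⟩|⟨h,hx⟩|⟨h,hx⟩|⟨h,hx⟩ <;>
      (subst hx; revert h; simp_all)
  rw [hnil]
  rfl

-- ===== VERDICT =====
theorem class_to_code_py_spec : Claim_equal_class_to_code_py := by
  intro class_name _
  unfold Spec_class_to_code_py class_to_code_py class_to_code_py_alt
  exact pv_main (PySem.Str.strip (PySem.Str.lower (if class_name = "" then "UNK" else class_name)))
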